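-- pv_equiv track=rewrite | github.com/bmmeijers/pysfc | src/pysfc/pysfc.py | _key_hchunks
-- ===== SOURCE A (Python) =====
-- def _key_hchunks(key, mbits, ndims):
--     # pre conditions
--     assert type(key) in [int], "Expected int, but found: {}".format(type(key))
--     assert type(mbits) in [int], "Expected int, but found: {}".format(type(mbits))
--     assert type(ndims) in [int], "Expected int, but found: {}".format(type(ndims))
--
--     p = 2**ndims
--     hchunks = [0] * mbits
--     for j in range(mbits - 1, -1, -1):
--         hchunks[j] = key % p
--         key //= p
--
--     # post condition: all int's
--     for h in hchunks:
--         assert type(h) in [int], "Expected int, but found: {}".format(type(p))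
--
--     return hchunks
-- ===== SOURCE B (Python) =====
-- def _key_hchunks(key, mbits, ndims):
--     # pre conditions
--     assert type(key) in [int], "Expected int, but found: {}".format(type(key))
--     assert type(mbits) in [int], "Expected int, but found: {}".format(type(mbits))
--     assert type(ndims) in [int], "Expected int, but found: {}".format(type(ndims))
--     # each chunk is read directly from the original key by shift and mask
--     return [(key >> (ndims * (mbits - 1 - i))) & ((1 << ndims) - 1)
--             for i in range(mbits)]
-- ===== Notes on version B (the rewrite author's own statement) =====
-- stated objective: alternative
-- what changed: Replaces the sequential right-to-left division loop (running quotient: hchunks[j] = key % p; key //= p) with independent per-index extraction: each chunk is read directly from the original key by an arithmetic right shift and a bit mask, with no carry/state dependency between iterations.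
import Mathlib
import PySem

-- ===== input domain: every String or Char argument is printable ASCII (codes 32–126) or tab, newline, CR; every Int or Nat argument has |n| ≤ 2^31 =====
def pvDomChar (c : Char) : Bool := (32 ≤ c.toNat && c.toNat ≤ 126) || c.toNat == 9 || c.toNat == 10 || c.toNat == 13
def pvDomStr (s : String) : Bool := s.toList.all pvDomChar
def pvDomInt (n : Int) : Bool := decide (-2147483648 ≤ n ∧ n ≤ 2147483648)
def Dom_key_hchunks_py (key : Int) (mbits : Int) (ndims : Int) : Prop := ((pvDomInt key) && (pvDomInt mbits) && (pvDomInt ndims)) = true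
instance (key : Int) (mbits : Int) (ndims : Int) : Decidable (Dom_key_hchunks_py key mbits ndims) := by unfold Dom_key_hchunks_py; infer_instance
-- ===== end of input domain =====

-- B replaces A's sequential division loop (running quotient) by an independent
-- shift-and-mask read of each chunk directly from the original key (alternative
-- decomposition, same cost).


-- ===== PORT A =====
-- 'p = 2**ndims' is exact for ndims ≥ 0 (guaranteed by Pre_ when the loop runs;
-- for mbits ≤ 0 the loop is empty and p is unused); the loop over
-- range(mbits-1, -1, -1) threads (hchunks, key) and each j is in range, so the
-- total pySetD form is exact.
def key_hchunks_py (key : Int) (mbits : Int) (ndims : Int) : List Int :=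
  let p : Int := 2 ^ ndims.toNat
  ((PySem.List.pyRange (mbits - 1) (-1) (-1)).foldl
    (fun st j => (PySem.List.pySetD st.1 j (PySem.Int.mod st.2 p), PySem.Int.floordiv st.2 p))
    (List.replicate mbits.toNat 0, key)).1

-- ===== PORT B =====
-- Python's '>>' and '&' on int are core Lean's '>>>' and PySem.Int.band; the
-- shift amount ndims*(mbits-1-i) is ≥ 0 whenever the comprehension body runs
-- under Pre_ (ndims ≥ 0 and 0 ≤ i < mbits), so '.toNat' is exact there.
def key_hchunks_py_alt (key : Int) (mbits : Int) (ndims : Int) : List Int :=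
  (PySem.List.pyRange 0 mbits 1).map (fun i =>
    PySem.Int.band (key >>> (ndims * (mbits - 1 - i)).toNat) ((1 <<< ndims.toNat) - 1))

-- ===== PRECONDITION & SPEC =====
-- Pre_ excludes only ndims < 0 with mbits ≥ 1: there Python A computes
-- p = 2**ndims as a float and its post-condition assert raises AssertionError
-- (B's negative-count shift raises ValueError), so A returns no value.
def Pre_key_hchunks_py (_key : Int) (mbits : Int) (ndims : Int) : Prop :=
  0 ≤ ndims ∨ mbits ≤ 0
instance (key : Int) (mbits : Int) (ndims : Int) : Decidable (Pre_key_hchunks_py key mbits ndims) := by unfold Pre_key_hchunks_py; infer_instance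
def pvWitness_key_hchunks_py : Int × Int × Int := (37, 3, 2)

def Spec_key_hchunks_py (key : Int) (mbits : Int) (ndims : Int) (out : List Int) : Prop := out = key_hchunks_py_alt key mbits ndims
instance (key : Int) (mbits : Int) (ndims : Int) (out : List Int) : Decidable (Spec_key_hchunks_py key mbits ndims out) := by unfold Spec_key_hchunks_py; infer_instance

-- ===== CLAIM (what is proved, stated in full; the proofs are below) =====
def Claim_equal_key_hchunks_py : Prop := ∀ (key : Int) (mbits : Int) (ndims : Int), Dom_key_hchunks_py key mbits ndims → Pre_key_hchunks_py key mbits ndims → Spec_key_hchunks_py key mbits ndims (key_hchunks_py key mbits ndims)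

-- ===== LEMMAS AND PROOFS =====

-- the common digit list: chunks p k n = the n base-p digits of k, most significant first
def pvChunks (p : Int) (k : Int) : Nat → List Int
  | 0 => []
  | n + 1 => pvChunks p (PySem.Int.floordiv k p) n ++ [PySem.Int.mod k p]

-- A's fold over range(n-1, -1, -1) writes exactly the digit list into the first n slots
theorem pvFoldA (p : Int) : ∀ (n : Nat) (lst : List Int) (k : Int), n ≤ lst.length →
    ((PySem.List.pyRange ((n : Int) - 1) (-1) (-1)).foldl
      (fun st j => (PySem.List.pySetD st.1 j (PySem.Int.mod st.2 p), PySem.Int.floordiv st.2 p))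
      (lst, k)).1 = pvChunks p k n ++ lst.drop n := by
  intro n
  induction n with
  | zero =>
    intro lst k _
    rw [PySem.List.pyRange_neg_one_eq_nil (by omega)]
    simp [pvChunks]
  | succ n ih =>
    intro lst k hlen
    have hn : (n : Nat) < lst.length := by omega
    have hstart : ((n + 1 : Nat) : Int) - 1 = (n : Int) := by push_cast; ring
    rw [hstart, PySem.List.pyRange_neg_one_cons (by omega)]
    rw [List.foldl_cons]
    simp only [PySem.List.pySetD_natCast]
    rw [ih (lst.set n (PySem.Int.mod k p)) (PySem.Int.floordiv k p) (by rw [List.length_set]; omega)]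
    have hdrop : (lst.set n (PySem.Int.mod k p)).drop n
        = PySem.Int.mod k p :: lst.drop (n + 1) := by
      rw [List.drop_eq_getElem_cons (by simpa using hn)]
      rw [List.getElem_set_self, List.drop_set_of_lt (by omega)]
    rw [hdrop, pvChunks]
    simp

-- shifting by d more bits is one more floor-division by p = 2^d
theorem pvShiftStep (d : Nat) (k : Int) (s : Nat) :
    k >>> (d + s) = (PySem.Int.floordiv k (2 ^ d)) >>> s := by
  rw [Int.shiftRight_add, Int.shiftRight_eq_div_pow k d,
    PySem.Int.floordiv_eq_ediv_of_pos (by positivity)]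
  norm_num

-- Python's  x & (2^d - 1)  is exactly  x % 2^d  (also for negative x)
theorem pvMask (x : Int) (d : Nat) :
    PySem.Int.band x ((2 : Int) ^ d - 1) = PySem.Int.mod x ((2 : Int) ^ d) := by
  have hp : (0 : Int) < 2 ^ d := by positivity
  have hP1 : (1 : Nat) ≤ 2 ^ d := Nat.one_le_two_pow
  have hcast : ((2 : Int) ^ d) = ((2 ^ d : Nat) : Int) := by push_cast; ring
  have htoNat : ((2 : Int) ^ d - 1).toNat = 2 ^ d - 1 := by omega
  have h1 : (0 : Int) ≤ (2 : Int) ^ d - 1 := by omega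
  rw [PySem.Int.mod_eq_emod_of_pos hp]
  rcases x with m | m
  · -- x = ↑m ≥ 0
    rw [Int.ofNat_eq_natCast]
    have h0 : (0 : Int) ≤ (m : Int) := Int.natCast_nonneg m
    simp only [PySem.Int.band, if_pos h0, if_pos h1, htoNat, Int.toNat_natCast]
    rw [Nat.and_two_pow_sub_one_eq_mod, hcast, Int.natCast_mod]
  · -- x = -(m+1) < 0
    have h0 : ¬ (0 : Int) ≤ Int.negSucc m := not_le.mpr (Int.negSucc_lt_zero m)
    have hm1 : (-(Int.negSucc m) - 1).toNat = m := by
      rw [Int.negSucc_eq]; omega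
    simp only [PySem.Int.band, if_neg h0, if_pos h1, htoNat, hm1]
    rw [Nat.and_comm, Nat.and_two_pow_sub_one_eq_mod]
    have hr : m % 2 ^ d < 2 ^ d := Nat.mod_lt _ (by omega)
    have hdm : ((2 ^ d : Nat) : Int) * ((m / 2 ^ d : Nat) : Int) + ((m % 2 ^ d : Nat) : Int)
        = (m : Int) := by exact_mod_cast Nat.div_add_mod m (2 ^ d)
    have heq : Int.negSucc m
        = ((2 ^ d - 1 - m % 2 ^ d : Nat) : Int)
          + ((2 ^ d : Nat) : Int) * (-((m / 2 ^ d : Nat) : Int) - 1) := by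
      rw [Int.negSucc_eq]
      have hc2 : ((2 ^ d - 1 - m % 2 ^ d : Nat) : Int)
          = ((2 ^ d : Nat) : Int) - 1 - ((m % 2 ^ d : Nat) : Int) := by omega
      rw [hc2]; linear_combination hdm
    rw [hcast, heq, Int.add_mul_emod_self_left,
      Int.emod_eq_of_lt (by omega) (by omega)]

-- B's comprehension produces the same digit list
theorem pvMapB (d : Nat) : ∀ (n : Nat) (k : Int),
    (PySem.List.pyRange 0 (n : Int) 1).map (fun i =>
        PySem.Int.band (k >>> (((d : Int)) * ((n : Int) - 1 - i)).toNat) ((2 : Int) ^ d - 1))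
      = pvChunks ((2 : Int) ^ d) k n := by
  intro n
  induction n with
  | zero => intro k; rw [PySem.List.pyRange_one_eq_nil (by omega)]; simp [pvChunks]
  | succ n ih =>
    intro k
    have hsucc : ((n + 1 : Nat) : Int) = (n : Int) + 1 := by push_cast; ring
    rw [hsucc, PySem.List.pyRange_one_succ_right (by omega), List.map_append, List.map_cons,
      List.map_nil]
    have hlast : ((d : Int) * ((n : Int) + 1 - 1 - (n : Int))).toNat = 0 := by
      have : (d : Int) * ((n : Int) + 1 - 1 - (n : Int)) = 0 := by ring
      rw [this]; rfl
    have hpre : (PySem.List.pyRange 0 (n : Int) 1).map (fun i =>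
          PySem.Int.band (k >>> (((d : Int)) * ((n : Int) + 1 - 1 - i)).toNat) ((2 : Int) ^ d - 1))
        = (PySem.List.pyRange 0 (n : Int) 1).map (fun i =>
          PySem.Int.band ((PySem.Int.floordiv k (2 ^ d)) >>> (((d : Int)) * ((n : Int) - 1 - i)).toNat) ((2 : Int) ^ d - 1)) := by
      apply List.map_congr_left
      intro i hi
      obtain ⟨hi0, hin⟩ := PySem.List.mem_pyRange_one.mp hi
      have hsplit : ((d : Int) * ((n : Int) + 1 - 1 - i)).toNat
          = d + ((d : Int) * ((n : Int) - 1 - i)).toNat := by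
        have h1 : (0 : Int) ≤ (d : Int) * ((n : Int) - 1 - i) := mul_nonneg (by positivity) (by omega)
        have h2 : (d : Int) * ((n : Int) + 1 - 1 - i) = (d : Int) + (d : Int) * ((n : Int) - 1 - i) := by ring
        omega
      rw [hsplit, pvShiftStep]
    rw [hpre, ih, hlast, Int.shiftRight_zero, pvMask]
    rfl

-- ===== VERDICT (by name: the statement is the Claim_ definition above) =====
theorem key_hchunks_py_spec : Claim_equal_key_hchunks_py := by
  intro key mbits ndims _ hPre
  unfold Spec_key_hchunks_py key_hchunks_py key_hchunks_py_alt
  by_cases hm : mbits ≤ 0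
  · rw [PySem.List.pyRange_neg_one_eq_nil (by omega), PySem.List.pyRange_one_eq_nil (by omega)]
    simp [Int.toNat_of_nonpos hm]
  · have hnd : 0 ≤ ndims := by rcases hPre with h | h; exact h; omega
    obtain ⟨m, rfl⟩ : ∃ m : Nat, mbits = (m : Int) :=
      ⟨mbits.toNat, (Int.toNat_of_nonneg (by omega)).symm⟩
    obtain ⟨d, rfl⟩ : ∃ d : Nat, ndims = (d : Int) :=
      ⟨ndims.toNat, (Int.toNat_of_nonneg hnd).symm⟩
    simp only [Int.toNat_natCast]
    rw [pvFoldA ((2 : Int) ^ d) m (List.replicate m 0) key (by simp)]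
    rw [show (((1 <<< d : Nat) : Int)) - 1 = (2 : Int) ^ d - 1 from by push_cast [Nat.shiftLeft_eq]; ring]
    rw [pvMapB d m key]
    have hnil : List.drop m (List.replicate m (0 : Int)) = [] := by
      simp
    rw [hnil, List.append_nil]
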